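-- pv_equiv track=rewrite | github.com/ezra3000/truck_loader | path_finder.py | find_next_closest
-- ===== SOURCE A (Python) =====
-- def find_next_closest(distance_list, searching):
--     sorted_list = sorted(distance_list.values())
--     sorted_dictionary = {}
--     for i in sorted_list:
--         for k in distance_list.keys():
--             if distance_list[k] == i:
--                 sorted_dictionary[k] = distance_list[k]
--
--     for q in sorted_dictionary.keys():
--         if q in searching:
--             return q
--         else:
--             continue
--     return -1
-- ===== SOURCE B (Python) =====
-- def find_next_closest(distance_list, searching):
--     want = set(searching)
--     hits = [kv for kv in distance_list.items() if kv[0] in want]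
--     if hits:
--         return min(hits, key=lambda kv: kv[1])[0]
--     return -1
-- ===== Notes on version B (the rewrite author's own statement) =====
-- stated objective: faster
-- what changed: A sorts the values and rebuilds the whole dict in value order with a nested loop over all keys per value, then scans that dict's keys for the first one in searching; B makes one pass collecting the items whose key is in a set built from searching and returns the key of the first item with minimal value (Python's min, which keeps the first extremal element, matching A's value-then-insertion-order tie-break).
import Mathlib
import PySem

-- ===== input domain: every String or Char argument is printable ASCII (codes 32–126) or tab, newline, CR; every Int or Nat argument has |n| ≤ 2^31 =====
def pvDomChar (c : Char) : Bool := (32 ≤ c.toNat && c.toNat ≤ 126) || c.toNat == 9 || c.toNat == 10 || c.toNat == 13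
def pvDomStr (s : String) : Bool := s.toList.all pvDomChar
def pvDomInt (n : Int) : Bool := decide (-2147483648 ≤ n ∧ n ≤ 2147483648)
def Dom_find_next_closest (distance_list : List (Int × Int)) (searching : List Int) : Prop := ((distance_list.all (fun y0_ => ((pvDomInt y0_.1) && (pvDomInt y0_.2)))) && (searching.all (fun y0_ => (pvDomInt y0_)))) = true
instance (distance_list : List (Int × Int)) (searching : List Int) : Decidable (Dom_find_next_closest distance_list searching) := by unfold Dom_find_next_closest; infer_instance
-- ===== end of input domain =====

-- B replaces A's sort-the-values + quadratic dict rebuild + key scan by one pass keeping the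
-- first minimal-value item whose key is in a set of `searching` (objective: faster).


-- ===== PORT A =====
-- the final 'for q in sorted_dictionary.keys(): return q if q in searching / return -1'
def pvFindLoop (ks : List Int) (searching : List Int) : Int :=
  match ks with
  | [] => -1
  | q :: rest => if searching.contains q then q else pvFindLoop rest searching

def find_next_closest (distance_list : List (Int × Int)) (searching : List Int) : Int :=
  let d : PySem.Dict Int Int := ⟨distance_list⟩
  -- sorted_list = sorted(distance_list.values())
  let sorted_list := PySem.List.sorted d.values (fun v => v) false
  -- nested loop building sorted_dictionary; distance_list[k] is exact as getD here (k comes from d.keys)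
  let sorted_dictionary :=
    sorted_list.foldl
      (fun sd i =>
        d.keys.foldl
          (fun sd k =>
            if PySem.Dict.getD d k 0 == i then PySem.Dict.insert sd k (PySem.Dict.getD d k 0) else sd)
          sd)
      PySem.Dict.empty
  pvFindLoop sorted_dictionary.keys searching

-- ===== PORT B =====
def find_next_closest_alt (distance_list : List (Int × Int)) (searching : List Int) : Int :=
  let want : PySem.Set Int := PySem.Set.ofList searching
  let hits := distance_list.filter (fun kv => PySem.Set.contains want kv.1)
  match PySem.List.min? hits (fun kv => kv.2) with
  | some kv => kv.1
  | none => -1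

-- ===== PRECONDITION & SPEC =====
-- Pre_: the association list encodes a Python dict, whose keys are necessarily distinct
-- (every input the Python A actually receives satisfies this; it excludes nothing A is run on).
def Pre_find_next_closest (distance_list : List (Int × Int)) (searching : List Int) : Prop :=
  (distance_list.map Prod.fst).Nodup
instance (distance_list : List (Int × Int)) (searching : List Int) : Decidable (Pre_find_next_closest distance_list searching) := by unfold Pre_find_next_closest; infer_instance

def pvWitness_find_next_closest : (List (Int × Int)) × List Int := ([(1, 5), (2, 3)], [1, 2])

def Spec_find_next_closest (distance_list : List (Int × Int)) (searching : List Int) (out : Int) : Prop := out = find_next_closest_alt distance_list searching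
instance (distance_list : List (Int × Int)) (searching : List Int) (out : Int) : Decidable (Spec_find_next_closest distance_list searching out) := by unfold Spec_find_next_closest; infer_instance

-- ===== CLAIM (what is proved, stated in full; the proofs are below) =====
def Claim_equal_find_next_closest : Prop := ∀ (distance_list : List (Int × Int)) (searching : List Int), Dom_find_next_closest distance_list searching → Pre_find_next_closest distance_list searching → Spec_find_next_closest distance_list searching (find_next_closest distance_list searching)

-- ===== LEMMAS AND PROOFS =====

-- a key determines its pair in a duplicate-key-free association list
theorem pvKeyUnique {dl : List (Int × Int)} (h : (dl.map Prod.fst).Nodup)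
    {p q : Int × Int} (hp : p ∈ dl) (hq : q ∈ dl) (hk : p.1 = q.1) : p = q := by
  have h1 : (PySem.Dict.mk dl).get? p.1 = some p.2 :=
    PySem.Dict.get?_of_mem_items _ hp h
  have h2 : (PySem.Dict.mk dl).get? q.1 = some q.2 :=
    PySem.Dict.get?_of_mem_items _ hq h
  rw [hk] at h1; rw [h1] at h2
  exact Prod.ext hk (Option.some.inj h2)

-- looking a key of the dict up returns its value
theorem pvLookup {dl : List (Int × Int)} (h : (dl.map Prod.fst).Nodup)
    {p : Int × Int} (hp : p ∈ dl) : PySem.Dict.getD (PySem.Dict.mk dl) p.1 0 = p.2 := by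
  have := PySem.Dict.get?_of_mem_items (PySem.Dict.mk dl) hp h
  simp [PySem.Dict.getD, this]

-- the inner 'for k in distance_list.keys()' loop re-read as a loop over the items
theorem pvInnerPairs (d : PySem.Dict Int Int) (i : Int) :
    ∀ (l : List (Int × Int)) (sd : PySem.Dict Int Int),
      (∀ p ∈ l, PySem.Dict.getD d p.1 0 = p.2) →
      (l.map Prod.fst).foldl
        (fun sd k => if PySem.Dict.getD d k 0 == i then PySem.Dict.insert sd k (PySem.Dict.getD d k 0) else sd) sd
      = l.foldl (fun sd p => if p.2 == i then PySem.Dict.insert sd p.1 p.2 else sd) sd := by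
  intro l
  induction l with
  | nil => intro sd _; rfl
  | cons p l ih =>
    intro sd hl
    have hp := hl p (List.mem_cons_self)
    simp only [List.map_cons, List.foldl_cons, hp]
    exact ih _ (fun q hq => hl q (List.mem_cons_of_mem _ hq))

-- two dicts with the same item list are equal
theorem pvDictExt {d e : PySem.Dict Int Int} (h : d.items = e.items) : d = e := by
  cases d; cases e; cases h; rfl

-- inserting a fresh group appends it
theorem pvInnerNew (i : Int) :
    ∀ (l : List (Int × Int)) (sd : PySem.Dict Int Int),
      (l.map Prod.fst).Nodup →
      (∀ p ∈ l, p.2 = i → sd.contains p.1 = false) →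
      l.foldl (fun sd p => if p.2 == i then PySem.Dict.insert sd p.1 p.2 else sd) sd
      = PySem.Dict.mk (sd.items ++ l.filter (fun p => p.2 == i)) := by
  intro l
  induction l with
  | nil => intro sd _ _; simp
  | cons p l ih =>
    intro sd hnd hfresh
    rw [List.map_cons] at hnd
    obtain ⟨hnp, hnd'⟩ := List.nodup_cons.mp hnd
    simp only [List.foldl_cons]
    by_cases hpi : p.2 = i
    · rw [if_pos (by simpa using hpi)]
      have hc : sd.contains p.1 = false := hfresh p List.mem_cons_self hpi
      have hitems := PySem.Dict.items_insert_of_not_contains sd p.2 hc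
      rw [ih (PySem.Dict.insert sd p.1 p.2) hnd' ?_]
      · rw [hitems]
        rw [List.filter_cons, if_pos (by simpa using hpi : (p.2 == i) = true), List.append_assoc]
        rfl
      · intro q hq hqi
        rw [PySem.Dict.contains_insert]
        have hq1 : q.1 ≠ p.1 := by
          intro hk
          exact hnp (hk ▸ List.mem_map_of_mem hq)
        simp [hq1, hfresh q (List.mem_cons_of_mem _ hq) hqi]
    · rw [if_neg (by simpa using hpi)]
      rw [ih sd hnd' (fun q hq hqi => hfresh q (List.mem_cons_of_mem _ hq) hqi)]
      rw [List.filter_cons, if_neg (by simpa using hpi : ¬ (p.2 == i) = true)]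

-- re-inserting a group already present changes nothing
theorem pvInnerOld (i : Int) :
    ∀ (l : List (Int × Int)) (sd : PySem.Dict Int Int),
      sd.keys.Nodup →
      (∀ p ∈ l, p.2 = i → (p.1, p.2) ∈ sd.items) →
      l.foldl (fun sd p => if p.2 == i then PySem.Dict.insert sd p.1 p.2 else sd) sd = sd := by
  intro l
  induction l with
  | nil => intro sd _ _; rfl
  | cons p l ih =>
    intro sd hnk hmem
    simp only [List.foldl_cons]
    by_cases hpi : p.2 = i
    · rw [if_pos (by simpa using hpi)]
      have hin : (p.1, p.2) ∈ sd.items := hmem p List.mem_cons_self hpi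
      have hc : sd.contains p.1 = true := by
        simp only [PySem.Dict.contains, List.any_eq_true]
        exact ⟨(p.1, p.2), hin, by simp⟩
      have heq : PySem.Dict.insert sd p.1 p.2 = sd := by
        apply pvDictExt
        rw [PySem.Dict.items_insert_of_contains sd p.2 hc]
        have hid : ∀ q ∈ sd.items, (if (q.1 == p.1) = true then (p.1, p.2) else q) = id q := by
          intro q hq
          by_cases hk : q.1 = p.1
          · have : q = (p.1, p.2) := pvKeyUnique hnk hq hin hk
            simp [this]
          · simp [hk]
        rw [List.map_congr_left hid, List.map_id]
      rw [heq]
      exact ih sd hnk (fun q hq hqi => hmem q (List.mem_cons_of_mem _ hq) hqi)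
    · rw [if_neg (by simpa using hpi)]
      exact ih sd hnk (fun q hq hqi => hmem q (List.mem_cons_of_mem _ hq) hqi)

-- a fold of Set.add appends a sublist
theorem pvAddSublist : ∀ (l acc : List Int),
    ∃ t, l.foldl PySem.Set.add acc = acc ++ t ∧ t.Sublist l := by
  intro l
  induction l with
  | nil => intro acc; exact ⟨[], by simp⟩
  | cons x l ih =>
    intro acc
    by_cases hx : x ∈ acc
    · obtain ⟨t, ht, hs⟩ := ih acc
      refine ⟨t, ?_, hs.cons _⟩
      simp only [List.foldl_cons, PySem.Set.add, PySem.Set.contains]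
      rw [if_pos (by simpa using hx)]
      exact ht
    · obtain ⟨t, ht, hs⟩ := ih (acc ++ [x])
      refine ⟨x :: t, ?_, hs.cons₂ _⟩
      simp only [List.foldl_cons, PySem.Set.add, PySem.Set.contains]
      rw [if_neg (by simpa using hx), ht, List.append_assoc]
      rfl

-- keys of a value-grouped concatenation are distinct
theorem pvKeysFlatMapNodup {dl : List (Int × Int)} (h : (dl.map Prod.fst).Nodup) :
    ∀ (seen : List Int), seen.Nodup →
      ((seen.flatMap (fun v => dl.filter (fun p => p.2 == v))).map Prod.fst).Nodup := by
  intro seen hseen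
  rw [List.map_flatMap, List.nodup_flatMap]
  constructor
  · intro v _
    exact ((List.filter_sublist).map Prod.fst).nodup h
  · refine hseen.imp ?_
    intro v w hvw hk hkv hkw
    obtain ⟨p, hp, hp1⟩ := List.mem_map.mp hkv
    obtain ⟨q, hq, hq1⟩ := List.mem_map.mp hkw
    obtain ⟨hpl, hpv⟩ := List.mem_filter.mp hp
    obtain ⟨hql, hqw⟩ := List.mem_filter.mp hq
    have : p = q := pvKeyUnique h hpl hql (by rw [hp1, hq1])
    apply hvw
    have hv : p.2 = v := by simpa using hpv
    have hw : q.2 = w := by simpa using hqw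
    rw [← hv, ← hw, this]

-- the outer 'for i in sorted_list' loop: the dict built so far is the grouped list over the seen values
theorem pvOuter {dl : List (Int × Int)} (h : (dl.map Prod.fst).Nodup) :
    ∀ (vs seen : List Int), seen.Nodup →
      vs.foldl
        (fun sd i => dl.foldl (fun sd p => if p.2 == i then PySem.Dict.insert sd p.1 p.2 else sd) sd)
        (PySem.Dict.mk (seen.flatMap (fun v => dl.filter (fun p => p.2 == v))))
      = PySem.Dict.mk ((vs.foldl PySem.Set.add seen).flatMap (fun v => dl.filter (fun p => p.2 == v))) := by
  intro vs
  induction vs with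
  | nil => intro seen _; rfl
  | cons i vs ih =>
    intro seen hseen
    simp only [List.foldl_cons]
    by_cases hi : i ∈ seen
    · have hold := pvInnerOld i dl (PySem.Dict.mk (seen.flatMap (fun v => dl.filter (fun p => p.2 == v))))
        (by exact pvKeysFlatMapNodup h seen hseen)
        (by
          intro p hp hpi
          show (p.1, p.2) ∈ seen.flatMap (fun v => dl.filter (fun p => p.2 == v))
          have hmem : p ∈ dl.filter (fun q => q.2 == i) :=
            List.mem_filter.mpr ⟨hp, by simpa using hpi⟩
          exact List.mem_flatMap.mpr ⟨i, hi, hmem⟩)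
      rw [hold]
      have hadd : PySem.Set.add seen i = seen := by
        simp [PySem.Set.add, PySem.Set.contains, hi]
      rw [hadd]
      exact ih seen hseen
    · have hfresh : ∀ p ∈ dl, p.2 = i →
          (PySem.Dict.mk (seen.flatMap (fun v => dl.filter (fun p => p.2 == v)))).contains p.1 = false := by
        intro p hp hpi
        rw [PySem.Dict.contains, List.any_eq_false]
        intro q hq
        simp only [beq_iff_eq]
        intro hk
        obtain ⟨v, hv, hqf⟩ := List.mem_flatMap.mp hq
        obtain ⟨hql, hqv⟩ := List.mem_filter.mp hqf
        have : q = p := pvKeyUnique h hql hp hk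
        apply hi
        have : v = i := by
          have h2 : q.2 = v := by simpa using hqv
          rw [← h2, this, hpi]
        exact this ▸ hv
      have hnew := pvInnerNew i dl (PySem.Dict.mk (seen.flatMap (fun v => dl.filter (fun p => p.2 == v)))) h hfresh
      rw [hnew]
      have hadd : PySem.Set.add seen i = seen ++ [i] := by
        simp [PySem.Set.add, PySem.Set.contains, hi]
      rw [hadd]
      have hflat : (seen ++ [i]).flatMap (fun v => dl.filter (fun p => p.2 == v))
          = seen.flatMap (fun v => dl.filter (fun p => p.2 == v)) ++ dl.filter (fun p => p.2 == i) := by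
        simp [List.flatMap_append]
      have hgoal := ih (seen ++ [i]) (by
        rw [List.nodup_append]
        refine ⟨hseen, List.nodup_singleton i, ?_⟩
        intro a ha b hb
        rw [List.mem_singleton] at hb
        subst hb
        exact fun hab => hi (hab ▸ ha))
      rw [← hflat]
      exact hgoal

-- the return-inside-for loop as find?
theorem pvFindLoopEq (s : List Int) :
    ∀ (l : List (Int × Int)),
      pvFindLoop (l.map Prod.fst) s
      = (match l.find? (fun p => s.contains p.1) with
         | some p => p.1
         | none => -1) := by
  intro l
  induction l with
  | nil => rfl
  | cons p l ih =>
    by_cases hp : p.1 ∈ s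
    · simp [pvFindLoop, hp]
    · simp only [List.map_cons, pvFindLoop, List.find?_cons]
      simpa [hp] using ih

-- find? over a filter, with the roles of the two predicates exchanged
theorem pvFindSwap {α : Type} (p q : α → Bool) (l : List α) :
    (l.filter q).find? p = (l.filter p).find? q := by
  rw [← List.head?_filter, ← List.head?_filter, List.filter_filter, List.filter_filter]
  rw [List.filter_congr (by intro x hx; rw [Bool.and_comm])]

-- the running first-strict-min step of Python's min(xs, key=...)
def pvStep (acc : Option (Int × Int)) (x : Int × Int) : Option (Int × Int) :=
  match acc with
  | none => some x
  | some m => if x.2 < m.2 then some x else some m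

theorem pvMinEqFoldStep (hs : List (Int × Int)) :
    PySem.List.min? hs (fun q => q.2) = hs.foldl pvStep none := by
  simp only [PySem.List.min?]
  apply List.foldl_ext
  intro acc x _
  cases acc <;> rfl

-- the running first-strict-min loop ignores elements that are not smaller
theorem pvMinKeep (v : Int) :
    ∀ (hs : List (Int × Int)) (m : Int × Int), m.2 = v → (∀ q ∈ hs, v ≤ q.2) →
      hs.foldl pvStep (some m) = some m := by
  intro hs
  induction hs with
  | nil => intro m _ _; rfl
  | cons q hs ih =>
    intro m hm hle
    have hq : v ≤ q.2 := hle q List.mem_cons_self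
    simp only [List.foldl_cons, pvStep]
    rw [if_neg (by omega : ¬ q.2 < m.2)]
    exact ih m hm (fun r hr => hle r (List.mem_cons_of_mem _ hr))

-- the first element with the least possible snd is what the first-strict-min loop returns
theorem pvMinFirst (v : Int) (q0 : Int × Int) :
    ∀ (hs : List (Int × Int)) (acc : Option (Int × Int)),
      (∀ q ∈ hs, v ≤ q.2) → (∀ m, acc = some m → v < m.2) →
      hs.find? (fun q => q.2 == v) = some q0 →
      hs.foldl pvStep acc = some q0 := by
  intro hs
  induction hs with
  | nil => intro acc _ _ hfind; exact absurd hfind (by simp)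
  | cons q hs ih =>
    intro acc hle hacc hfind
    have hq : v ≤ q.2 := hle q List.mem_cons_self
    rw [List.find?_cons] at hfind
    by_cases hv : q.2 = v
    · -- q is the first element with least value: it becomes and stays the accumulator
      have hb : (q.2 == v) = true := by simpa using hv
      rw [hb] at hfind
      obtain rfl : q = q0 := Option.some.inj hfind
      have hstep : pvStep acc q = some q := by
        cases acc with
        | none => rfl
        | some m =>
          have hvm := hacc m rfl
          simp only [pvStep]
          rw [if_pos (by omega)]
      simp only [List.foldl_cons, hstep]
      exact pvMinKeep v hs q hv (fun r hr => hle r (List.mem_cons_of_mem _ hr))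
    · have hb : (q.2 == v) = false := by simpa using hv
      rw [hb] at hfind
      have hq' : v < q.2 := lt_of_le_of_ne hq (fun h => hv h.symm)
      have hstep : ∀ m, pvStep acc q = some m → v < m.2 := by
        intro m hm
        cases acc with
        | none => obtain rfl : q = m := Option.some.inj hm; exact hq'
        | some m' =>
          simp only [pvStep] at hm
          by_cases hlt : q.2 < m'.2
          · rw [if_pos hlt] at hm; obtain rfl : q = m := Option.some.inj hm; exact hq'
          · rw [if_neg hlt] at hm; obtain rfl : m' = m := Option.some.inj hm; exact hacc _ rfl
      simp only [List.foldl_cons]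
      exact ih _ (fun r hr => hle r (List.mem_cons_of_mem _ hr)) hstep hfind

-- scanning the value-grouped list for the first hit is taking the first minimal hit
theorem pvFindMin :
    ∀ (order : List Int) (l : List (Int × Int)) (p : Int × Int → Bool),
      order.Pairwise (· ≤ ·) →
      (∀ q ∈ l, p q = true → q.2 ∈ order) →
      (order.flatMap (fun v => l.filter (fun q => q.2 == v))).find? p
      = PySem.List.min? (l.filter p) (fun q => q.2) := by
  intro order
  induction order with
  | nil =>
    intro l p _ hval
    have hnil : l.filter p = [] :=
      List.filter_eq_nil_iff.mpr (fun q hq hpq => by simpa using hval q hq hpq)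
    simp [hnil, PySem.List.min?]
  | cons v rest ih =>
    intro l p hpair hval
    obtain ⟨hhead, htail⟩ := List.pairwise_cons.mp hpair
    rw [List.flatMap_cons, List.find?_append]
    cases h1 : (l.filter (fun q => q.2 == v)).find? p with
    | some q0 =>
      rw [Option.some_or]
      -- q0 is the first hit with the least possible value v
      have hq0mem : q0 ∈ l.filter (fun q => q.2 == v) := List.mem_of_find?_eq_some h1
      have hq0p : p q0 = true := List.find?_some h1
      have hfind : (l.filter p).find? (fun q => q.2 == v) = some q0 := by
        rw [← pvFindSwap]; exact h1
      have hle : ∀ q ∈ l.filter p, v ≤ q.2 := by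
        intro q hq
        have hql : q ∈ l := List.mem_of_mem_filter hq
        have hqp : p q = true := List.of_mem_filter hq
        have : q.2 ∈ v :: rest := hval q hql hqp
        rcases List.mem_cons.mp this with h | h
        · omega
        · exact hhead _ h
      have hmin : (l.filter p).foldl pvStep none = some q0 :=
        pvMinFirst v q0 (l.filter p) none hle (fun m hm => by cases hm) hfind
      rw [pvMinEqFoldStep, hmin]
    | none =>
      rw [Option.none_or]
      apply ih l p htail
      intro q hq hpq
      have : q.2 ∈ v :: rest := hval q hq hpq
      rcases List.mem_cons.mp this with h | h
      · exfalso
        have hqf : q ∈ l.filter (fun r => r.2 == v) :=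
          List.mem_filter.mpr ⟨hq, by simpa using h⟩
        exact absurd hpq (List.find?_eq_none.mp h1 q hqf)
      · exact h

-- membership in the set built from `searching` is membership in `searching`
theorem pvContainsOfList (s : List Int) (x : Int) :
    PySem.Set.contains (PySem.Set.ofList s) x = s.contains x := by
  have := PySem.Set.mem_ofList s x
  simp only [PySem.Set.contains, List.contains_eq_mem]
  exact decide_eq_decide.mpr this

-- ===== VERDICT (by name: the statement is the Claim_ definition above) =====
theorem find_next_closest_spec : Claim_equal_find_next_closest := by
  intro dl s _hDom hPre
  show find_next_closest dl s = find_next_closest_alt dl s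
  have hbody : (fun (sd : PySem.Dict Int Int) (i : Int) =>
        (PySem.Dict.mk dl).keys.foldl
          (fun sd k => if PySem.Dict.getD (PySem.Dict.mk dl) k 0 == i then PySem.Dict.insert sd k (PySem.Dict.getD (PySem.Dict.mk dl) k 0) else sd) sd)
      = (fun (sd : PySem.Dict Int Int) (i : Int) =>
        dl.foldl (fun sd p => if p.2 == i then PySem.Dict.insert sd p.1 p.2 else sd) sd) := by
    funext sd i
    exact pvInnerPairs (PySem.Dict.mk dl) i dl sd (fun p hp => pvLookup hPre hp)
  have hfold :
      (PySem.List.sorted (PySem.Dict.values (PySem.Dict.mk dl)) (fun v => v) false).foldl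
        (fun (sd : PySem.Dict Int Int) (i : Int) =>
          (PySem.Dict.mk dl).keys.foldl
            (fun sd k => if PySem.Dict.getD (PySem.Dict.mk dl) k 0 == i then PySem.Dict.insert sd k (PySem.Dict.getD (PySem.Dict.mk dl) k 0) else sd) sd)
        PySem.Dict.empty
      = PySem.Dict.mk ((PySem.Set.ofList (PySem.List.sorted (PySem.Dict.values (PySem.Dict.mk dl)) (fun v => v) false)).flatMap
          (fun v => dl.filter (fun p => p.2 == v))) := by
    rw [hbody]
    exact pvOuter hPre (PySem.List.sorted (PySem.Dict.values (PySem.Dict.mk dl)) (fun v => v) false) [] List.nodup_nil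
  have hA : find_next_closest dl s
      = pvFindLoop (((PySem.Set.ofList (PySem.List.sorted (PySem.Dict.values (PySem.Dict.mk dl)) (fun v => v) false)).flatMap
          (fun v => dl.filter (fun p => p.2 == v))).map Prod.fst) s := by
    show pvFindLoop ((PySem.List.sorted (PySem.Dict.values (PySem.Dict.mk dl)) (fun v => v) false).foldl
        (fun (sd : PySem.Dict Int Int) (i : Int) =>
          (PySem.Dict.mk dl).keys.foldl
            (fun sd k => if PySem.Dict.getD (PySem.Dict.mk dl) k 0 == i then PySem.Dict.insert sd k (PySem.Dict.getD (PySem.Dict.mk dl) k 0) else sd) sd)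
        PySem.Dict.empty).keys s = _
    rw [hfold]
    rfl
  rw [hA, pvFindLoopEq s]
  have hord : (PySem.Set.ofList (PySem.List.sorted (PySem.Dict.values (PySem.Dict.mk dl)) (fun v => v) false)).Pairwise (· ≤ ·) := by
    obtain ⟨t, ht, hsub⟩ := pvAddSublist (PySem.List.sorted (PySem.Dict.values (PySem.Dict.mk dl)) (fun v => v) false) []
    have hof : PySem.Set.ofList (PySem.List.sorted (PySem.Dict.values (PySem.Dict.mk dl)) (fun v => v) false) = t := by
      simpa using ht
    rw [hof]
    exact List.Pairwise.sublist hsub (PySem.List.sorted_pairwise _ (fun v => v))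
  have hval : ∀ q ∈ dl, (fun (q : Int × Int) => s.contains q.1) q = true →
      q.2 ∈ PySem.Set.ofList (PySem.List.sorted (PySem.Dict.values (PySem.Dict.mk dl)) (fun v => v) false) := by
    intro q hq _
    apply (PySem.Set.mem_ofList _ _).mpr
    rw [PySem.List.mem_sorted]
    exact List.mem_map_of_mem hq
  rw [pvFindMin _ dl (fun q => s.contains q.1) hord hval]
  have hfilt : dl.filter (fun kv => PySem.Set.contains (PySem.Set.ofList s) kv.1)
      = dl.filter (fun q => s.contains q.1) :=
    List.filter_congr (fun x _ => pvContainsOfList s x.1)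
  show (match PySem.List.min? (dl.filter (fun q => s.contains q.1)) (fun q => q.2) with
        | some kv => kv.1
        | none => -1)
      = (match PySem.List.min? (dl.filter (fun kv => PySem.Set.contains (PySem.Set.ofList s) kv.1)) (fun kv => kv.2) with
        | some kv => kv.1
        | none => -1)
  rw [hfilt]
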